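-- pv_equiv track=rewrite | github.com/stevenkozeniesky02/shellsense | src/shellsense/core/parser.py | _extract_subshells
-- ===== SOURCE A (Python) =====
-- def _extract_subshells(text: str) -> tuple[str, ...]:
--     """Extract commands from $(...) subshell expressions."""
--     subshells: list[str] = []
--     i = 0
--
--     while i < len(text):
--         if text[i] == "$" and i + 1 < len(text) and text[i + 1] == "(":
--             depth = 1
--             start = i + 2
--             j = start
--             while j < len(text) and depth > 0:
--                 if text[j] == "(":
--                     depth += 1
--                 elif text[j] == ")":
--                     depth -= 1
--                 j += 1
--             if depth == 0:
--                 subshells.append(text[start : j - 1])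
--             i = j
--         else:
--             i += 1
--
--     return tuple(subshells)
-- ===== SOURCE B (Python) =====
-- def _extract_subshells(text: str) -> tuple[str, ...]:
--     """Extract commands from $(...) subshell expressions.
--
--     Staged approach: first precompute the prefix parenthesis-balance array
--     bal (bal[k] = #'(' - #')' in text[:k]); then repeatedly locate '$(' with
--     str.find and find the matching close as the first j >= p+2 with
--     bal[j+1] == bal[p+1], with no depth counter anywhere.
--     """
--     bal = [0]
--     b = 0
--     for c in text:
--         b += (c == "(") - (c == ")")
--         bal.append(b)
--     out: list[str] = []
--     i = 0
--     while True:
--         p = text.find("$(", i)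
--         if p == -1:
--             break
--         target = bal[p + 1]
--         j = next((j for j in range(p + 2, len(text)) if bal[j + 1] == target), None)
--         if j is None:
--             break
--         out.append(text[p + 2 : j])
--         i = j + 1
--     return tuple(out)
-- ===== Notes on version B (the rewrite author's own statement) =====
-- stated objective: alternative
-- what changed: Replaced the depth-counter scan entirely: B first precomputes a prefix parenthesis-balance array in one pass, then repeatedly locates the subshell opener with str.find and finds the matching close as the first later index whose balance equals the balance just before the open paren, so no depth variable exists during extraction.
import Mathlib
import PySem

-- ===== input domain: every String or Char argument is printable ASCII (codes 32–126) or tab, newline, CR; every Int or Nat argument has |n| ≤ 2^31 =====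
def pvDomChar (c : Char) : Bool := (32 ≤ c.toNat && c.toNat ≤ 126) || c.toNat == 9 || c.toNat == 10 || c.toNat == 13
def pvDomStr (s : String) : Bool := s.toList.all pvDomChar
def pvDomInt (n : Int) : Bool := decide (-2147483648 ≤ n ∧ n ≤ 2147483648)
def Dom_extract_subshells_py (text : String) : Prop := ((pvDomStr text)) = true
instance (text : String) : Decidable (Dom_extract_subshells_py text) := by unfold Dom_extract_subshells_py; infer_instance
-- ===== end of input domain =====

-- B replaces A's depth-counter scan by staged passes: a precomputed prefix-balance array,
-- then find('$(') plus a search for the first later index with matching balance (objective: alternative).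
-- Both Pythons' loops are ported as fuel recursions; fuel always covers the remaining characters,
-- so the fuel-0 case is only reached past the end of the string.

-- ===== PORT A =====
-- inner while loop: 'while j < len(text) and depth > 0: …' (indices are guarded by j < n, so getD is exact)
def pvA_inner (cs : List Char) (n : Nat) : Nat → Nat → Nat → Nat × Nat
  | 0, j, depth => (j, depth)
  | fuel+1, j, depth =>
    if j < n ∧ 0 < depth then
      if cs.getD j ' ' = '(' then pvA_inner cs n fuel (j+1) (depth+1)
      else if cs.getD j ' ' = ')' then pvA_inner cs n fuel (j+1) (depth-1)
      else pvA_inner cs n fuel (j+1) depth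
    else (j, depth)

-- outer while loop; 'text[start : j - 1]' is a nonnegative in-range slice, ported exactly as drop/take
def pvA_outer (cs : List Char) (n : Nat) : Nat → Nat → List String → List String
  | 0, _, acc => acc
  | fuel+1, i, acc =>
    if i < n then
      if cs.getD i ' ' = '$' ∧ i + 1 < n ∧ cs.getD (i+1) ' ' = '(' then
        let p := pvA_inner cs n n (i+2) 1
        let acc' := if p.2 = 0 then acc ++ [String.ofList ((cs.drop (i+2)).take (p.1 - 1 - (i+2)))] else acc
        pvA_outer cs n fuel p.1 acc'
      else pvA_outer cs n fuel (i+1) acc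
    else acc

def extract_subshells_py (text : String) : List String :=
  pvA_outer text.toList text.toList.length text.toList.length 0 []

-- ===== PORT B =====
-- b += (c == '(') - (c == ')')
def pvDelta (c : Char) : Int := (if c = '(' then 1 else 0) - (if c = ')' then 1 else 0)

-- 'bal = [0]; b = 0; for c in text: b += …; bal.append(b)'
def pvBalStep (s : Int × List Int) (c : Char) : Int × List Int :=
  (s.1 + pvDelta c, s.2 ++ [s.1 + pvDelta c])

def pvBal (cs : List Char) : List Int := (cs.foldl pvBalStep (0, [0])).2

-- 'text.find("$(", i)' : first p ≥ i with text[p]='$', text[p+1]='(' (none = -1)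
def pvFind (cs : List Char) (n : Nat) : Nat → Nat → Option Nat
  | 0, _ => none
  | fuel+1, i =>
    if i + 1 < n then
      if cs.getD i ' ' = '$' ∧ cs.getD (i+1) ' ' = '(' then some i
      else pvFind cs n fuel (i+1)
    else none

-- 'next((j for j in range(p+2, n) if bal[j+1] == target), None)'
def pvClose (bal : List Int) (n : Nat) (target : Int) : Nat → Nat → Option Nat
  | 0, _ => none
  | fuel+1, j =>
    if j < n then
      if bal.getD (j+1) 0 = target then some j
      else pvClose bal n target fuel (j+1)
    else none

-- 'while True: p = find…; target = bal[p+1]; j = next…; append text[p+2:j]; i = j+1'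
def pvB_main (cs : List Char) (n : Nat) (bal : List Int) : Nat → Nat → List String → List String
  | 0, _, acc => acc
  | fuel+1, i, acc =>
    match pvFind cs n n i with
    | none => acc
    | some p =>
      match pvClose bal n (bal.getD (p+1) 0) n (p+2) with
      | none => acc
      | some j =>
        pvB_main cs n bal fuel (j+1) (acc ++ [String.ofList ((cs.drop (p+2)).take (j - (p+2)))])

def extract_subshells_py_alt (text : String) : List String :=
  pvB_main text.toList text.toList.length (pvBal text.toList) text.toList.length 0 []

-- ===== PRECONDITION & SPEC =====
def Spec_extract_subshells_py (text : String) (out : List String) : Prop := out = extract_subshells_py_alt text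
instance (text : String) (out : List String) : Decidable (Spec_extract_subshells_py text out) := by unfold Spec_extract_subshells_py; infer_instance

-- ===== CLAIM (what is proved, stated in full; the proofs are below) =====
def Claim_equal_extract_subshells_py : Prop := ∀ (text : String), Dom_extract_subshells_py text → Spec_extract_subshells_py text (extract_subshells_py text)

-- ===== LEMMAS AND PROOFS =====

-- the balances strung together: b0, then each running value
def pvPartials : List Char → Int → List Int
  | [], _ => []
  | c :: t, b => (b + pvDelta c) :: pvPartials t (b + pvDelta c)

theorem pvBal_spec : ∀ (cs : List Char) (b0 : Int) (l0 : List Int),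
    cs.foldl pvBalStep (b0, l0) = (b0 + (cs.map pvDelta).sum, l0 ++ pvPartials cs b0) := by
  intro cs
  induction cs with
  | nil => intro b0 l0; simp [pvPartials]
  | cons c t ih =>
    intro b0 l0
    simp only [List.foldl_cons, pvBalStep, pvPartials, List.map_cons, List.sum_cons]
    rw [ih]
    simp [add_assoc]

theorem pvBal_eq (cs : List Char) : pvBal cs = 0 :: pvPartials cs 0 := by
  unfold pvBal
  rw [pvBal_spec]
  simp

-- the step relation of the balance list: bal[j+1] = bal[j] + delta(text[j])
theorem pvPartials_step : ∀ (cs : List Char) (b0 : Int) (j : Nat), j < cs.length →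
    (b0 :: pvPartials cs b0).getD (j+1) 0 = (b0 :: pvPartials cs b0).getD j 0 + pvDelta (cs.getD j ' ') := by
  intro cs
  induction cs with
  | nil => intro b0 j h; simp at h
  | cons c t ih =>
    intro b0 j h
    cases j with
    | zero => simp [pvPartials]
    | succ j =>
      have h' : j < t.length := by simpa using h
      have := ih (b0 + pvDelta c) j h'
      simpa [pvPartials] using this

theorem pvBal_step (cs : List Char) (j : Nat) (h : j < cs.length) :
    (pvBal cs).getD (j+1) 0 = (pvBal cs).getD j 0 + pvDelta (cs.getD j ' ') := by
  rw [pvBal_eq]; exact pvPartials_step cs 0 j h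

-- pvFind facts
theorem pvFind_none (cs : List Char) (n : Nat) : ∀ (f i : Nat), n ≤ i + 1 → pvFind cs n f i = none := by
  intro f i h
  cases f with
  | zero => rfl
  | succ f => rw [pvFind]; simp [show ¬ (i + 1 < n) by omega]

theorem pvFind_irrel (cs : List Char) (n : Nat) :
    ∀ (f1 f2 i : Nat), n - i ≤ f1 → n - i ≤ f2 → pvFind cs n f1 i = pvFind cs n f2 i := by
  intro f1
  induction f1 with
  | zero =>
    intro f2 i h1 _
    rw [pvFind_none cs n 0 i (by omega), pvFind_none cs n f2 i (by omega)]
  | succ f ih =>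
    intro f2 i h1 h2
    by_cases hi : i + 1 < n
    · cases f2 with
      | zero => omega
      | succ g =>
        rw [pvFind, pvFind]
        simp only [if_pos hi]
        split_ifs with hc
        · rfl
        · exact ih g (i+1) (by omega) (by omega)
    · rw [pvFind_none cs n (f+1) i (by omega), pvFind_none cs n f2 i (by omega)]

theorem pvFind_ge (cs : List Char) (n : Nat) :
    ∀ (f i p : Nat), pvFind cs n f i = some p →
    i ≤ p ∧ p + 1 < n ∧ cs.getD p ' ' = '$' ∧ cs.getD (p+1) ' ' = '(' := by
  intro f
  induction f with
  | zero => intro i p h; exact absurd h (by simp [pvFind])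
  | succ f ih =>
    intro i p h
    rw [pvFind] at h
    by_cases hi : i + 1 < n
    · simp only [if_pos hi] at h
      split_ifs at h with hc
      · cases h; exact ⟨le_refl _, hi, hc.1, hc.2⟩
      · have := ih (i+1) p h
        exact ⟨by omega, this.2⟩
    · simp [if_neg hi] at h

-- pvClose facts
theorem pvClose_ge (bal : List Int) (n : Nat) (target : Int) :
    ∀ (f j k : Nat), pvClose bal n target f j = some k → j ≤ k ∧ k < n := by
  intro f
  induction f with
  | zero => intro j k h; exact absurd h (by simp [pvClose])
  | succ f ih =>
    intro j k h
    rw [pvClose] at h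
    by_cases hj : j < n
    · simp only [if_pos hj] at h
      split_ifs at h with hc
      · cases h; exact ⟨le_refl _, hj⟩
      · have := ih (j+1) k h
        exact ⟨by omega, this.2⟩
    · simp [if_neg hj] at h

-- once depth is 0, A's inner loop returns immediately
theorem pvA_inner_zero (cs : List Char) (n : Nat) (f j : Nat) :
    pvA_inner cs n f j 0 = (j, 0) := by
  cases f with
  | zero => rfl
  | succ f => rw [pvA_inner]; simp

-- THE BRIDGE: A's inner depth loop, started with invariant depth = bal j - target,
-- ends exactly where B's balance search finds bal (k+1) = target (or at n with depth ≠ 0)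
theorem pvBridge (cs : List Char) (n : Nat) (bal : List Int) (target : Int)
    (hn : n = cs.length)
    (hβ : ∀ j, j < n → bal.getD (j+1) 0 = bal.getD j 0 + pvDelta (cs.getD j ' ')) :
    ∀ (f j d : Nat), n - j ≤ f → j ≤ n → 0 < d → (d : Int) = bal.getD j 0 - target →
    (∀ k, pvClose bal n target f j = some k → pvA_inner cs n f j d = (k+1, 0)) ∧
    (pvClose bal n target f j = none →
      (pvA_inner cs n f j d).1 = n ∧ (pvA_inner cs n f j d).2 ≠ 0) := by
  intro f
  induction f with
  | zero =>
    intro j d hf hjn hd hinv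
    constructor
    · intro k h; exact absurd h (by simp [pvClose])
    · intro _
      rw [pvA_inner]
      exact ⟨by omega, by omega⟩
  | succ f ih =>
    intro j d hf hjn hd hinv
    by_cases hj : j < n
    · have hstep := hβ j hj
      by_cases hcl : bal.getD (j+1) 0 = target
      · -- the close: char must be ')' and d must be 1
        have hδ : pvDelta (cs.getD j ' ') = -(d : Int) := by omega
        have hdelta_cases : pvDelta (cs.getD j ' ') = 1 ∨ pvDelta (cs.getD j ' ') = 0 ∨
            pvDelta (cs.getD j ' ') = -1 := by
          unfold pvDelta; split_ifs <;> simp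
        have hd1 : d = 1 := by omega
        have hδ' : pvDelta (cs.getD j ' ') = -1 := by omega
        have hpar : cs.getD j ' ' = ')' := by
          by_contra hne
          unfold pvDelta at hδ'
          split_ifs at hδ' <;> omega
        have hnotop : cs.getD j ' ' ≠ '(' := by rw [hpar]; decide
        subst hd1
        constructor
        · intro k hk
          rw [pvClose, if_pos hj, if_pos hcl] at hk
          cases hk
          rw [pvA_inner]
          simp only [if_pos (And.intro hj hd), if_neg hnotop, if_pos hpar]
          simpa using pvA_inner_zero cs n f (j+1)
        · intro hk
          rw [pvClose, if_pos hj, if_pos hcl] at hk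
          exact absurd hk (by simp)
      · -- not the close: both loops step to j+1
        have hrec : pvClose bal n target (f+1) j = pvClose bal n target f (j+1) := by
          rw [pvClose, if_pos hj, if_neg hcl]
        have hδne : pvDelta (cs.getD j ' ') ≠ -(d : Int) := by omega
        have hstep' : pvA_inner cs n (f+1) j d =
            pvA_inner cs n f (j+1) (if cs.getD j ' ' = '(' then d+1
              else if cs.getD j ' ' = ')' then d-1 else d) := by
          rw [pvA_inner]
          simp only [if_pos (And.intro hj hd)]
          split_ifs <;> rfl
        set d' : Nat := (if cs.getD j ' ' = '(' then d+1
              else if cs.getD j ' ' = ')' then d-1 else d) with hd'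
        have hδd' : (d' : Int) = (d : Int) + pvDelta (cs.getD j ' ') ∧ 0 < d' := by
          by_cases h1 : cs.getD j ' ' = '('
          · have hδ1 : pvDelta (cs.getD j ' ') = 1 := by rw [h1]; decide
            rw [hd', if_pos h1, hδ1]
            refine ⟨by omega, by omega⟩
          · by_cases h2 : cs.getD j ' ' = ')'
            · have hδ2 : pvDelta (cs.getD j ' ') = -1 := by rw [h2]; decide
              have hdge : 2 ≤ d := by omega
              rw [hd', if_neg h1, if_pos h2, hδ2]
              refine ⟨by omega, by omega⟩
            · have hδ0 : pvDelta (cs.getD j ' ') = 0 := by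
                unfold pvDelta; rw [if_neg h1, if_neg h2]; ring
              rw [hd', if_neg h1, if_neg h2, hδ0]
              refine ⟨by omega, hd⟩
        have hih := ih (j+1) d' (by omega) (by omega) hδd'.2
          (by have h5 := hδd'.1; rw [hstep]; omega)
        rw [hstep', hrec]
        exact hih
    · have hjn' : j = n := by omega
      have hcl : pvClose bal n target (f+1) j = none := by
        rw [pvClose]; simp [show ¬ (j < n) by omega]
      constructor
      · intro k hk; rw [hcl] at hk; cases hk
      · intro _
        rw [pvA_inner]
        simp only [show ¬ (j < n ∧ 0 < d) by omega, ite_false]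
        exact ⟨hjn', by omega⟩

-- past the end, A's outer loop returns the accumulator
theorem pvA_outer_stop (cs : List Char) (n f i : Nat) (acc : List String) (h : n ≤ i) :
    pvA_outer cs n f i acc = acc := by
  cases f with
  | zero => rfl
  | succ f => rw [pvA_outer]; simp [show ¬ (i < n) by omega]

-- if find yields nothing, B's loop returns the accumulator
theorem pvB_stop (cs : List Char) (n : Nat) (bal : List Int) (g i : Nat) (acc : List String)
    (h : pvFind cs n n i = none) : pvB_main cs n bal g i acc = acc := by
  cases g with
  | zero => rfl
  | succ g => rw [pvB_main]; rw [h]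

-- unfolding equations for one iteration of B's loop
theorem pvB_main_eq_close_none (cs : List Char) (n : Nat) (bal : List Int) (f i p : Nat)
    (acc : List String) (hf : 0 < f) (hp : pvFind cs n n i = some p)
    (hc : pvClose bal n (bal.getD (p+1) 0) n (p+2) = none) :
    pvB_main cs n bal f i acc = acc := by
  obtain ⟨g, rfl⟩ : ∃ g, f = g + 1 := ⟨f - 1, by omega⟩
  rw [pvB_main, hp]
  show (match pvClose bal n (bal.getD (p+1) 0) n (p+2) with
        | none => acc
        | some j =>
          pvB_main cs n bal g (j+1) (acc ++ [String.ofList ((cs.drop (p+2)).take (j - (p+2)))])) = acc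
  rw [hc]

theorem pvB_main_eq_some (cs : List Char) (n : Nat) (bal : List Int) (f i p j : Nat)
    (acc : List String) (hf : 0 < f) (hp : pvFind cs n n i = some p)
    (hc : pvClose bal n (bal.getD (p+1) 0) n (p+2) = some j) :
    pvB_main cs n bal f i acc =
      pvB_main cs n bal (f-1) (j+1) (acc ++ [String.ofList ((cs.drop (p+2)).take (j - (p+2)))]) := by
  obtain ⟨g, rfl⟩ : ∃ g, f = g + 1 := ⟨f - 1, by omega⟩
  rw [pvB_main, hp]
  show (match pvClose bal n (bal.getD (p+1) 0) n (p+2) with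
        | none => acc
        | some j =>
          pvB_main cs n bal g (j+1) (acc ++ [String.ofList ((cs.drop (p+2)).take (j - (p+2)))])) = _
  rw [hc]
  simp only [Nat.add_sub_cancel]

-- B's loop result does not depend on the fuel once it covers the remaining characters
theorem pvB_irrel (cs : List Char) (n : Nat) (bal : List Int) :
    ∀ (f1 f2 i : Nat) (acc : List String), n - i ≤ f1 → n - i ≤ f2 →
    pvB_main cs n bal f1 i acc = pvB_main cs n bal f2 i acc := by
  intro f1
  induction f1 with
  | zero =>
    intro f2 i acc h1 _
    rw [pvB_stop cs n bal 0 i acc (pvFind_none cs n n i (by omega)),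
        pvB_stop cs n bal f2 i acc (pvFind_none cs n n i (by omega))]
  | succ f ih =>
    intro f2 i acc h1 h2
    cases f2 with
    | zero =>
      rw [pvB_stop cs n bal (f+1) i acc (pvFind_none cs n n i (by omega)),
          pvB_stop cs n bal 0 i acc (pvFind_none cs n n i (by omega))]
    | succ g =>
      cases hp : pvFind cs n n i with
      | none => rw [pvB_stop cs n bal (f+1) i acc hp, pvB_stop cs n bal (g+1) i acc hp]
      | some p =>
        cases hc : pvClose bal n (bal.getD (p+1) 0) n (p+2) with
        | none =>
          rw [pvB_main_eq_close_none cs n bal (f+1) i p acc (by omega) hp hc,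
              pvB_main_eq_close_none cs n bal (g+1) i p acc (by omega) hp hc]
        | some j =>
          rw [pvB_main_eq_some cs n bal (f+1) i p j acc (by omega) hp hc,
              pvB_main_eq_some cs n bal (g+1) i p j acc (by omega) hp hc]
          simp only [Nat.add_sub_cancel]
          have hpge := pvFind_ge cs n n i p hp
          have hjge := pvClose_ge bal n (bal.getD (p+1) 0) n (p+2) j hc
          exact ih g (j+1) _ (by omega) (by omega)

-- pvFind skips a non-start position
theorem pvFind_skip (cs : List Char) (n : Nat) (i : Nat) (hi : i < n)
    (h : ¬ (cs.getD i ' ' = '$' ∧ i + 1 < n ∧ cs.getD (i+1) ' ' = '(')) :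
    pvFind cs n n i = pvFind cs n n (i+1) := by
  by_cases hi1 : i + 1 < n
  · obtain ⟨m, rfl⟩ : ∃ m, n = m + 1 := ⟨n - 1, by omega⟩
    rw [pvFind, if_pos hi1, if_neg (by tauto)]
    exact pvFind_irrel cs (m+1) m (m+1) (i+1) (by omega) (by omega)
  · rw [pvFind_none cs n n i (by omega), pvFind_none cs n n (i+1) (by omega)]

-- pvFind at a start position returns it
theorem pvFind_self (cs : List Char) (n : Nat) (i : Nat)
    (h : cs.getD i ' ' = '$' ∧ i + 1 < n ∧ cs.getD (i+1) ' ' = '(') :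
    pvFind cs n n i = some i := by
  obtain ⟨m, rfl⟩ : ∃ m, n = m + 1 := ⟨n - 1, by omega⟩
  rw [pvFind, if_pos h.2.1, if_pos (And.intro h.1 h.2.2)]

-- MAIN: A's outer scan equals B's find/close loop
theorem pvMain (cs : List Char) (n : Nat) (bal : List Int)
    (hn : n = cs.length) (hbal : bal = pvBal cs) :
    ∀ (f i : Nat) (acc : List String), n - i ≤ f →
    pvA_outer cs n f i acc = pvB_main cs n bal n i acc := by
  have hβ : ∀ j, j < n → bal.getD (j+1) 0 = bal.getD j 0 + pvDelta (cs.getD j ' ') := by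
    intro j hj
    rw [hbal]
    exact pvBal_step cs j (by omega)
  intro f
  induction f with
  | zero =>
    intro i acc hf
    rw [pvA_outer, pvB_stop cs n bal n i acc (pvFind_none cs n n i (by omega))]
  | succ f ih =>
    intro i acc hf
    by_cases hi : i < n
    · by_cases hs : cs.getD i ' ' = '$' ∧ i + 1 < n ∧ cs.getD (i+1) ' ' = '('
      · -- a '$(' start
        have hi1 : i + 1 < n := hs.2.1
        have hfind := pvFind_self cs n i hs
        set target : Int := bal.getD (i+1) 0 with htarget
        have hinv : ((1 : Nat) : Int) = bal.getD (i+2) 0 - target := by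
          have hstep2 := hβ (i+1) hs.2.1
          rw [hs.2.2, show pvDelta '(' = 1 from by decide,
              show i + 1 + 1 = i + 2 from by omega] at hstep2
          omega
        have hbridge := pvBridge cs n bal target hn hβ n (i+2) 1 (by omega) (by omega)
          (by omega) hinv
        have hnody : n = (n - 1) + 1 := by omega
        rw [pvA_outer]
        simp only [if_pos hi, if_pos hs]
        cases hc : pvClose bal n target n (i+2) with
        | none =>
          have hend := hbridge.2 hc
          simp only [hend.2, ite_false]
          rw [pvA_outer_stop cs n f _ acc (by omega)]
          exact (pvB_main_eq_close_none cs n bal n i i acc (by omega) hfind hc).symm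
        | some k =>
          have hA := hbridge.1 k hc
          have hkge := pvClose_ge bal n target n (i+2) k hc
          rw [hA]
          simp only [ite_true]
          rw [pvB_main_eq_some cs n bal n i i k acc (by omega) hfind hc]
          have hslice : ((k+1, (0:Nat)).1) - 1 - (i+2) = k - (i+2) := by simp
          rw [hslice]
          rw [ih (k+1) _ (by omega)]
          exact pvB_irrel cs n bal n (n-1) (k+1) _ (by omega) (by omega)
      · -- not a start: both sides step to i+1
        rw [pvA_outer]
        simp only [if_pos hi, if_neg hs]
        rw [ih (i+1) acc (by omega)]
        have hfind := pvFind_skip cs n i hi hs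
        have hnody : n = (n - 1) + 1 := by omega
        cases hp : pvFind cs n n (i+1) with
        | none =>
          rw [pvB_stop cs n bal n i acc (hfind.trans hp), pvB_stop cs n bal n (i+1) acc hp]
        | some p =>
          cases hc : pvClose bal n (bal.getD (p+1) 0) n (p+2) with
          | none =>
            rw [pvB_main_eq_close_none cs n bal n (i+1) p acc (by omega) hp hc,
                pvB_main_eq_close_none cs n bal n i p acc (by omega) (hfind.trans hp) hc]
          | some j =>
            rw [pvB_main_eq_some cs n bal n (i+1) p j acc (by omega) hp hc,
                pvB_main_eq_some cs n bal n i p j acc (by omega) (hfind.trans hp) hc]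
    · rw [pvA_outer_stop cs n (f+1) i acc (by omega),
          pvB_stop cs n bal n i acc (pvFind_none cs n n i (by omega))]

-- ===== VERDICT (by name: the statement is the Claim_ definition above) =====
theorem extract_subshells_py_spec : Claim_equal_extract_subshells_py := by
  intro text _
  unfold Spec_extract_subshells_py extract_subshells_py extract_subshells_py_alt
  exact pvMain text.toList text.toList.length (pvBal text.toList) rfl rfl
    text.toList.length 0 [] (by omega)
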